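-- pv_equiv track=rewrite | github.com/HackForLive/adventofcode | aoc2024/src/t22/task.py | get_diffs_secret_number
-- ===== SOURCE A (Python) =====
-- from typing import List, Dict
--
-- def get_secret(s: int) -> int:
--     secret = s
--     secret = ((secret * 64) ^ secret) % 16777216
--     secret = ((secret//32) ^ secret) % 16777216
--     return ((secret*2048) ^ secret) % 16777216
--
-- def get_diffs_secret_number(s: int, time: int) -> Dict:
--     dic_n = {}
--
--     secret = s
--     secrets = [secret]
--     diffs = []
--
--     for _ in range(time):
--         tmp = get_secret(s=secret)
--         diffs.append((tmp%10)-(secret%10))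
--         secret = tmp
--         secrets.append(secret)
--
--     for i in range(3, len(diffs)):
--         seq = (diffs[i-3], diffs[i-2], diffs[i-1], diffs[i])
--         nu = secrets[i+1]% 10
--         if seq not in dic_n:
--             dic_n[seq]=nu
--     return dic_n
-- ===== SOURCE B (Python) =====
-- def get_secret(s: int) -> int:
--     secret = s
--     secret = ((secret * 64) ^ secret) % 16777216
--     secret = ((secret//32) ^ secret) % 16777216
--     return ((secret*2048) ^ secret) % 16777216
--
-- def get_diffs_secret_number(s: int, time: int):
--     dic_n = {}
--     secret = s
--     window = ()
--     for _ in range(time):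
--         tmp = get_secret(secret)
--         price = tmp % 10
--         window = (window + (price - secret % 10,))[-4:]
--         secret = tmp
--         if len(window) == 4:
--             dic_n.setdefault(window, price)
--     return dic_n
-- ===== Notes on version B (the rewrite author's own statement) =====
-- stated objective: simpler
-- what changed: B replaces A's build-two-lists-then-rescan structure (full secrets and diffs lists, then a second indexed loop over range(3, len(diffs))) by a single streaming pass that keeps only the current secret, a rolling window of the last four diffs, and the dict, inserting via setdefault as soon as the window is full.
import Mathlib
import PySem

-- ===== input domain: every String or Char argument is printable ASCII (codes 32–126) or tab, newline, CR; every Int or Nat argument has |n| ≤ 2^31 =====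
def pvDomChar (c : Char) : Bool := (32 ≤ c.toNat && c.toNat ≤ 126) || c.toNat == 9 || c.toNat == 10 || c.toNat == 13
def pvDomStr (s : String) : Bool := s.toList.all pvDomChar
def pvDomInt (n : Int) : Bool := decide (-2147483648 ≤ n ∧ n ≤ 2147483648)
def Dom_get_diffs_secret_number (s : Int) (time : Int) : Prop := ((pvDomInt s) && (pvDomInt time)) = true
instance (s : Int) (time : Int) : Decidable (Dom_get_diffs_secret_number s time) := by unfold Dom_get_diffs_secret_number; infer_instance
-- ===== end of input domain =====

-- B fuses A's two loops (build secrets/diffs lists, then rescan by index) into one streaming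
-- pass with a rolling 4-diff window and dict.setdefault; same return value, objective: simpler.

-- ===== PORT A =====
def get_secret (s : Int) : Int :=
  let secret := s
  let secret := PySem.Int.mod (PySem.Int.bxor (secret * 64) secret) 16777216
  let secret := PySem.Int.mod (PySem.Int.bxor (PySem.Int.floordiv secret 32) secret) 16777216
  PySem.Int.mod (PySem.Int.bxor (secret * 2048) secret) 16777216

-- one iteration of A's first loop: state = (secret, secrets, diffs)
def pvStepA (st : Int × List Int × List Int) (_i : Int) : Int × List Int × List Int :=
  let secret := st.1
  let tmp := get_secret secret
  (tmp, st.2.1 ++ [tmp], st.2.2 ++ [PySem.Int.mod tmp 10 - PySem.Int.mod secret 10])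

-- one iteration of A's second loop (indices are in range, so pyGetD's default is never used)
def pvScanA (secrets diffs : List Int) (dic : PySem.Dict (List Int) Int) (i : Int) :
    PySem.Dict (List Int) Int :=
  let seq := [PySem.List.pyGetD diffs (i - 3) 0, PySem.List.pyGetD diffs (i - 2) 0,
              PySem.List.pyGetD diffs (i - 1) 0, PySem.List.pyGetD diffs i 0]
  let nu := PySem.Int.mod (PySem.List.pyGetD secrets (i + 1) 0) 10
  if !(dic.contains seq) then dic.insert seq nu else dic

def get_diffs_secret_number (s : Int) (time : Int) : List (List Int × Int) :=
  let st := (PySem.List.pyRange 0 time 1).foldl pvStepA (s, [s], ([] : List Int))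
  let secrets := st.2.1
  let diffs := st.2.2
  ((PySem.List.pyRange 3 ((diffs.length : Int)) 1).foldl (pvScanA secrets diffs) PySem.Dict.empty).items

-- ===== PORT B =====
-- one iteration of B's single loop: state = (secret, window, dic)
def pvStepB (st : Int × List Int × PySem.Dict (List Int) Int) (_i : Int) :
    Int × List Int × PySem.Dict (List Int) Int :=
  let secret := st.1
  let tmp := get_secret secret
  let price := PySem.Int.mod tmp 10
  let window := PySem.List.slice (st.2.1 ++ [price - PySem.Int.mod secret 10]) (some (-4)) none
  let dic := if window.length == 4 then st.2.2.setdefault window price else st.2.2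
  (tmp, window, dic)

def get_diffs_secret_number_alt (s : Int) (time : Int) : List (List Int × Int) :=
  ((PySem.List.pyRange 0 time 1).foldl pvStepB
      (s, ([] : List Int), (PySem.Dict.empty : PySem.Dict (List Int) Int))).2.2.items

-- ===== PRECONDITION & SPEC =====
def Spec_get_diffs_secret_number (s : Int) (time : Int) (out : List (List Int × Int)) : Prop := out = get_diffs_secret_number_alt s time
instance (s : Int) (time : Int) (out : List (List Int × Int)) : Decidable (Spec_get_diffs_secret_number s time out) := by unfold Spec_get_diffs_secret_number; infer_instance

-- ===== CLAIM (what is proved, stated in full; the proofs are below) =====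
def Claim_equal_get_diffs_secret_number : Prop := ∀ (s : Int) (time : Int), Dom_get_diffs_secret_number s time → Spec_get_diffs_secret_number s time (get_diffs_secret_number s time)

-- ===== LEMMAS AND PROOFS =====


-- proof helpers: the secret chain, prices, diffs, and the common dict recurrence
def pvSec (s : Int) (n : Nat) : Int := get_secret^[n] s
def pvP (s : Int) (n : Nat) : Int := PySem.Int.mod (pvSec s n) 10
def pvD (s : Int) (n : Nat) : Int := pvP s (n + 1) - pvP s n
def pvDiffs (s : Int) (n : Nat) : List Int := (List.range n).map (pvD s)
def pvSecrets (s : Int) (n : Nat) : List Int := (List.range (n + 1)).map (pvSec s)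
def pvWin (s : Int) (n : Nat) : List Int := (pvDiffs s n).drop (n - 4)
def pvDic (s : Int) : Nat → PySem.Dict (List Int) Int
  | 0 => PySem.Dict.empty
  | n + 1 =>
    if 4 ≤ n + 1 then
      let w := [pvD s (n - 3), pvD s (n - 2), pvD s (n - 1), pvD s n]
      let dc := pvDic s n
      if !(dc.contains w) then dc.insert w (pvP s (n + 1)) else dc
    else pvDic s n

theorem pv_foldl_ignore {σ : Type} (g : σ → Int → σ) (hg : ∀ st i, g st i = g st 0) :
    ∀ (l : List Int) (init : σ), l.foldl g init = (fun st => g st 0)^[l.length] init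
  | [], _ => rfl
  | a :: l, init => by
      simp only [List.foldl_cons, List.length_cons, Function.iterate_succ_apply, hg]
      exact pv_foldl_ignore g hg l (g init 0)

theorem pv_stepA_iter (s : Int) : ∀ n : Nat,
    (fun st => pvStepA st 0)^[n] (s, [s], ([] : List Int))
      = (pvSec s n, pvSecrets s n, pvDiffs s n)
  | 0 => by simp [pvSec, pvSecrets, pvDiffs]
  | n + 1 => by
      rw [Function.iterate_succ_apply', pv_stepA_iter s n]
      have hsec : get_secret (pvSec s n) = pvSec s (n + 1) :=
        (Function.iterate_succ_apply' get_secret n s).symm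
      simp only [pvStepA, hsec]
      refine Prod.ext rfl (Prod.ext ?_ ?_) <;>
        simp [pvSecrets, pvDiffs, List.range_succ, pvD, pvP]

theorem pv_len_win (s : Int) (n : Nat) : (pvWin s n).length = n - (n - 4) := by
  simp [pvWin, pvDiffs]

theorem pv_win_succ (s : Int) (n : Nat) :
    PySem.List.slice (pvWin s n ++ [pvD s n]) (some (-4)) none = pvWin s (n + 1) := by
  rw [PySem.List.slice_from_neg_ofNat _ 4 (by omega)]
  have h1 : pvWin s n ++ [pvD s n] = (pvDiffs s (n + 1)).drop (n - 4) := by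
    rw [pvWin, show pvDiffs s (n + 1) = pvDiffs s n ++ [pvD s n] by
      simp [pvDiffs, List.range_succ],
      List.drop_append_of_le_length (by simp [pvDiffs])]
  rw [h1, List.drop_drop, pvWin]
  congr 1
  have h2 : (pvDiffs s (n + 1)).length = n + 1 := by simp [pvDiffs]
  simp [List.length_drop, h2]
  omega

theorem pv_getD_diffs (s : Int) {k n : Nat} (h : k < n) :
    (pvDiffs s n).getD k 0 = pvD s k := by
  simp [pvDiffs, List.getD, h]

theorem pv_getD_secrets (s : Int) {k n : Nat} (h : k < n + 1) :
    (pvSecrets s n).getD k 0 = pvSec s k := by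
  simp [pvSecrets, List.getD, h]

theorem pv_win_eq (s : Int) {n : Nat} (h : 4 ≤ n) :
    pvWin s n = [pvD s (n - 4), pvD s (n - 3), pvD s (n - 2), pvD s (n - 1)] := by
  apply List.ext_getElem
  · simp [pvWin, pvDiffs]; omega
  · intro i h1 h2
    have hlen : (pvDiffs s n).length = n := by simp [pvDiffs]
    have hi : i < 4 := by simpa using h2
    simp only [pvWin, List.getElem_drop]
    have hidx : n - 4 + i < n := by omega
    have : (pvDiffs s n)[n - 4 + i]'(by omega) = pvD s (n - 4 + i) := by
      simp [pvDiffs]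
    rw [this]
    interval_cases i <;> simp <;> congr 1 <;> omega

theorem pv_setdefault_eq (d : PySem.Dict (List Int) Int) (w : List Int) (v : Int) :
    d.setdefault w v = if !(d.contains w) then d.insert w v else d := by
  by_cases h : d.contains w = true
  · simp [PySem.Dict.setdefault_of_contains, h]
  · have h' : d.contains w = false := by simpa using h
    simp [PySem.Dict.setdefault_of_not_contains, h']

theorem pv_stepB_iter (s : Int) : ∀ n : Nat,
    (fun st => pvStepB st 0)^[n] (s, ([] : List Int), (PySem.Dict.empty : PySem.Dict (List Int) Int))
      = (pvSec s n, pvWin s n, pvDic s n)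
  | 0 => by simp [pvSec, pvWin, pvDiffs, pvDic]
  | n + 1 => by
      rw [Function.iterate_succ_apply', pv_stepB_iter s n]
      have hsec : get_secret (pvSec s n) = pvSec s (n + 1) :=
        (Function.iterate_succ_apply' get_secret n s).symm
      have hdiff : PySem.Int.mod (pvSec s (n + 1)) 10 - PySem.Int.mod (pvSec s n) 10 = pvD s n := rfl
      simp only [pvStepB, hsec, hdiff, pv_win_succ s n]
      refine Prod.ext rfl (Prod.ext rfl ?_)
      simp only [pv_len_win]
      by_cases h4 : 4 ≤ n + 1
      · have hc : ((n + 1 - (n + 1 - 4) == 4) : Bool) = true := by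
          simp; omega
        rw [hc, if_pos rfl]
        have hw : pvWin s (n + 1) = [pvD s (n - 3), pvD s (n - 2), pvD s (n - 1), pvD s n] := by
          rw [pv_win_eq s h4, show n + 1 - 4 = n - 3 from by omega,
            show n + 1 - 3 = n - 2 from by omega, show n + 1 - 2 = n - 1 from by omega,
            show n + 1 - 1 = n from by omega]
        rw [hw, pv_setdefault_eq]
        conv_rhs => rw [pvDic]
        simp [h4, pvP]
      · have hc : ((n + 1 - (n + 1 - 4) == 4) : Bool) = false := by
          simp; omega
        rw [hc]
        conv_rhs => rw [pvDic]
        simp [h4]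

theorem pv_dic_small (s : Int) {m : Nat} (h : m ≤ 3) : pvDic s m = PySem.Dict.empty := by
  interval_cases m <;> simp [pvDic]

theorem pv_scan_iter (s : Int) (n : Nat) : ∀ m : Nat, m ≤ n →
    (PySem.List.pyRange 3 (m : Int) 1).foldl (pvScanA (pvSecrets s n) (pvDiffs s n))
      PySem.Dict.empty = pvDic s m
  | 0, _ => by
      rw [PySem.List.pyRange_one_eq_nil (by norm_num)]
      simp [pvDic]
  | m + 1, hm => by
      by_cases h3 : 3 ≤ m
      · have hcast : ((m : Int) + 1) = ((m + 1 : Nat) : Int) := by push_cast; ring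
        rw [← hcast, PySem.List.pyRange_one_succ_right (by exact_mod_cast h3),
          List.foldl_append, pv_scan_iter s n m (by omega)]
        simp only [List.foldl_cons, List.foldl_nil]
        have e1 : ((m : Int) - 3) = ((m - 3 : Nat) : Int) := by omega
        have e2 : ((m : Int) - 2) = ((m - 2 : Nat) : Int) := by omega
        have e3 : ((m : Int) - 1) = ((m - 1 : Nat) : Int) := by omega
        have e4 : ((m : Int) + 1) = ((m + 1 : Nat) : Int) := by omega
        rw [pvScanA, e1, e2, e3, e4]
        simp only [PySem.List.pyGetD_natCast]
        rw [pv_getD_diffs s (by omega), pv_getD_diffs s (by omega),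
          pv_getD_diffs s (by omega), pv_getD_diffs s (by omega),
          pv_getD_secrets s (by omega)]
        conv_rhs => rw [pvDic]
        simp [show 4 ≤ m + 1 by omega, pvP]
      · rw [PySem.List.pyRange_one_eq_nil (by omega), List.foldl_nil,
          pv_dic_small s (show m + 1 ≤ 3 by omega)]

-- ===== VERDICT (by name: the statement is the Claim_ definition above) =====
theorem get_diffs_secret_number_spec : Claim_equal_get_diffs_secret_number := by
  intro s time _
  unfold Spec_get_diffs_secret_number get_diffs_secret_number get_diffs_secret_number_alt
  have hlen : (PySem.List.pyRange 0 time 1).length = time.toNat := by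
    rw [PySem.List.length_pyRange_one]; omega
  rw [pv_foldl_ignore pvStepA (fun _ _ => rfl), pv_foldl_ignore pvStepB (fun _ _ => rfl),
    hlen, pv_stepA_iter, pv_stepB_iter]
  have hdl : ((pvDiffs s time.toNat).length : Int) = (time.toNat : Int) := by
    simp [pvDiffs]
  simp only [hdl]
  rw [pv_scan_iter s time.toNat time.toNat le_rfl]
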